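-- pv_equiv track=rewrite | github.com/Paulo-Filipe/earlycoding | listsalgo.py | bagdiff_on_merge
-- ===== SOURCE A (Python) =====
-- def bagdiff_on_merge(xs, ys):
--     result = []
--     match = []
--     xi = 0
--     while True:
--         if xi >= len(xs):
--             return result
--
--         if xs[xi] not in ys:
--             result.append(xs[xi])
--             xi += 1
--         else:
--             if xs[xi] in match:
--                 result.append(xs[xi])
--                 xi += 1
--                 continue
--             match.append(xs[xi])
--             xi += 1
-- ===== SOURCE B (Python) =====
-- def bagdiff_on_merge(xs, ys):
--     drop = [xs.index(v) for v in ys if v in xs]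
--     return [x for i, x in enumerate(xs) if i not in drop]
-- ===== Notes on version B (the rewrite author's own statement) =====
-- stated objective: simpler
-- what changed: B iterates over ys to collect the first-occurrence index in xs of each ys-value, then filters xs by index, instead of A's single while-loop that threads result/match accumulators over xs.
import Mathlib
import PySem

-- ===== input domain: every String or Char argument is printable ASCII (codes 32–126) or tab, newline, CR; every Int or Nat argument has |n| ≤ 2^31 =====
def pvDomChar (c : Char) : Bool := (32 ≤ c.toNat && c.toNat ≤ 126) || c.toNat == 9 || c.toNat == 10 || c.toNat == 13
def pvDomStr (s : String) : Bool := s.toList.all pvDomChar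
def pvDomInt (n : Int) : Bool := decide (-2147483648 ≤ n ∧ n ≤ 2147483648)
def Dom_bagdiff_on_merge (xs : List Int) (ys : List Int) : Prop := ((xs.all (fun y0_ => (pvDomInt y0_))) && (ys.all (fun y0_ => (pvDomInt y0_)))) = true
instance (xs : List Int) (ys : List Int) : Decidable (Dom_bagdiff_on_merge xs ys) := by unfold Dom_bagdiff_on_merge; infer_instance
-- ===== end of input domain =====

-- B replaces A's single while-loop threading result/match accumulators over xs by two passes:
-- collect the first-occurrence index in xs of each ys-value, then filter xs by index (objective: simpler).

-- ===== PORT A =====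
-- A's 'while True' loop over the cursor xi, with accumulators result and match.
-- xs[xi] is read only when xi < len xs, so List.getD is exact here.
def bagdiffLoop (xs ys result matc : List Int) (xi : Nat) : List Int :=
  if xi ≥ xs.length then result
  else
    let x := xs.getD xi 0
    if x ∉ ys then bagdiffLoop xs ys (result ++ [x]) matc (xi + 1)
    else if x ∈ matc then bagdiffLoop xs ys (result ++ [x]) matc (xi + 1)
    else bagdiffLoop xs ys result (matc ++ [x]) (xi + 1)
termination_by xs.length - xi
decreasing_by all_goals omega

def bagdiff_on_merge (xs : List Int) (ys : List Int) : List Int :=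
  bagdiffLoop xs ys [] [] 0

-- ===== PORT B =====
-- drop = [xs.index(v) for v in ys if v in xs]
def pvDropIdx (xs ys : List Int) : List Int :=
  ys.filterMap (fun v => if v ∈ xs then (PySem.List.index? xs v).map (fun k => (k : Int)) else none)

-- [x for i, x in enumerate(xs) if i not in drop]
def bagdiff_on_merge_alt (xs : List Int) (ys : List Int) : List Int :=
  (PySem.List.enumerate xs).filterMap (fun p => if p.1 ∈ pvDropIdx xs ys then none else some p.2)

-- ===== PRECONDITION & SPEC =====
def Spec_bagdiff_on_merge (xs : List Int) (ys : List Int) (out : List Int) : Prop := out = bagdiff_on_merge_alt xs ys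
instance (xs : List Int) (ys : List Int) (out : List Int) : Decidable (Spec_bagdiff_on_merge xs ys out) := by unfold Spec_bagdiff_on_merge; infer_instance

-- ===== CLAIM (what is proved, stated in full; the proofs are below) =====
def Claim_equal_bagdiff_on_merge : Prop := ∀ (xs : List Int) (ys : List Int), Dom_bagdiff_on_merge xs ys → Spec_bagdiff_on_merge xs ys (bagdiff_on_merge xs ys)

-- ===== LEMMAS AND PROOFS =====

-- index? xs x = some i ↔ i is the first position of x in xs
theorem index?_first_iff (xs : List Int) (x : Int) (i : Nat) :
    PySem.List.index? xs x = some i ↔ ∃ h : i < xs.length, xs[i] = x ∧ x ∉ xs.take i := by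
  rw [PySem.List.index?_eq_some_iff]
  constructor
  · rintro ⟨pre, suf, hxs, hlen, hnp⟩
    have hi : i < xs.length := by
      subst hxs; simp [List.length_append]; omega
    refine ⟨hi, ?_, ?_⟩
    · subst hxs hlen
      simp [List.getElem_append_right (Nat.le_refl pre.length)]
    · subst hxs hlen
      rw [List.take_left]
      exact hnp
  · rintro ⟨hi, hx, hnt⟩
    refine ⟨xs.take i, xs.drop (i + 1), ?_, by simp [Nat.min_eq_left hi.le], hnt⟩
    conv_lhs => rw [← List.take_append_drop i xs]
    rw [List.drop_eq_getElem_cons hi, hx]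

theorem mem_pvDropIdx_iff (xs ys : List Int) (i : Nat) (hi : i < xs.length) :
    (i : Int) ∈ pvDropIdx xs ys ↔ (xs[i] ∈ ys ∧ xs[i] ∉ xs.take i) := by
  unfold pvDropIdx
  rw [List.mem_filterMap]
  constructor
  · rintro ⟨v, hv, hsome⟩
    by_cases hvx : v ∈ xs
    · rw [if_pos hvx, PySem.List.index?_eq_idxOf?] at hsome
      cases hok : List.idxOf? v xs with
      | none => rw [hok] at hsome; exact absurd hsome (by simp)
      | some k =>
        rw [hok] at hsome
        have hki : k = i := by simpa using hsome
        subst hki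
        have hk2 : PySem.List.index? xs v = some k := by
          rw [PySem.List.index?_eq_idxOf?, hok]
        rw [index?_first_iff] at hk2
        obtain ⟨_, hx, hnt⟩ := hk2
        exact ⟨hx ▸ hv, hx ▸ hnt⟩
    · rw [if_neg hvx] at hsome; simp at hsome
  · rintro ⟨hy, hnt⟩
    refine ⟨xs[i], hy, ?_⟩
    have hmem : xs[i] ∈ xs := List.getElem_mem hi
    rw [if_pos hmem, (index?_first_iff xs xs[i] i).mpr ⟨hi, rfl, hnt⟩]
    rfl

theorem bagdiffLoop_eq (xs ys : List Int) :
    ∀ (n xi : Nat), n = xs.length - xi → ∀ (matc result : List Int),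
    (∀ v : Int, v ∈ matc ↔ (v ∈ ys ∧ v ∈ xs.take xi)) →
    bagdiffLoop xs ys result matc xi =
      result ++ ((PySem.List.enumerate xs).drop xi).filterMap
        (fun p => if p.1 ∈ pvDropIdx xs ys then none else some p.2) := by
  intro n
  induction n with
  | zero =>
    intro xi hn matc result _
    have hge : xi ≥ xs.length := by omega
    rw [bagdiffLoop, if_pos hge,
      List.drop_eq_nil_of_le (by simpa [PySem.List.length_enumerate] using hge)]
    simp
  | succ m ih =>
    intro xi hn matc result hinv
    have hlt : xi < xs.length := by omega
    have hx : xs.getD xi 0 = xs[xi] := List.getD_eq_getElem xs 0 hlt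
    have hdrop : (PySem.List.enumerate xs).drop xi =
        ((xi : Int), xs[xi]) :: (PySem.List.enumerate xs).drop (xi + 1) := by
      have henl : xi < (PySem.List.enumerate xs).length := by
        simpa [PySem.List.length_enumerate] using hlt
      rw [List.drop_eq_getElem_cons henl, PySem.List.getElem_enumerate]
      simp
    have htake : xs.take (xi + 1) = xs.take xi ++ [xs[xi]] :=
      List.take_succ_eq_append_getElem hlt
    rw [bagdiffLoop, if_neg (by omega), hx]
    by_cases hy : xs[xi] ∈ ys
    · rw [if_neg (by simpa using hy)]
      by_cases hm : xs[xi] ∈ matc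
      · -- already dropped once: keep this occurrence
        rw [if_pos hm]
        have hprev : xs[xi] ∈ xs.take xi := ((hinv xs[xi]).mp hm).2
        have hnd : ¬ ((xi : Int) ∈ pvDropIdx xs ys) := by
          rw [mem_pvDropIdx_iff xs ys xi hlt]
          exact fun h => h.2 hprev
        rw [ih (xi + 1) (by omega) matc (result ++ [xs[xi]]) (fun v => by
          rw [hinv v, htake]
          simp only [List.mem_append, List.mem_singleton]
          constructor
          · rintro ⟨h1, h2⟩; exact ⟨h1, Or.inl h2⟩
          · rintro ⟨h1, h2 | h2⟩
            · exact ⟨h1, h2⟩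
            · exact ⟨h1, h2 ▸ hprev⟩)]
        rw [hdrop]
        simp [hnd]
      · -- first occurrence of a ys-value: drop it
        rw [if_neg hm]
        have hnt : xs[xi] ∉ xs.take xi := fun h => hm ((hinv xs[xi]).mpr ⟨hy, h⟩)
        have hd : (xi : Int) ∈ pvDropIdx xs ys :=
          (mem_pvDropIdx_iff xs ys xi hlt).mpr ⟨hy, hnt⟩
        rw [ih (xi + 1) (by omega) (matc ++ [xs[xi]]) result (fun v => by
          rw [htake]
          simp only [List.mem_append, List.mem_singleton, hinv v]
          constructor
          · rintro (⟨h1, h2⟩ | h2)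
            · exact ⟨h1, Or.inl h2⟩
            · exact ⟨h2 ▸ hy, Or.inr h2⟩
          · rintro ⟨h1, h2 | h2⟩
            · exact Or.inl ⟨h1, h2⟩
            · exact Or.inr h2)]
        rw [hdrop]
        simp [hd]
    · -- not in ys: kept, and its index is never in drop
      rw [if_pos (by simpa using hy)]
      have hnd : ¬ ((xi : Int) ∈ pvDropIdx xs ys) := by
        rw [mem_pvDropIdx_iff xs ys xi hlt]
        exact fun h => hy h.1
      rw [ih (xi + 1) (by omega) matc (result ++ [xs[xi]]) (fun v => by
        rw [hinv v, htake]
        simp only [List.mem_append, List.mem_singleton]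
        constructor
        · rintro ⟨h1, h2⟩; exact ⟨h1, Or.inl h2⟩
        · rintro ⟨h1, h2 | h2⟩
          · exact ⟨h1, h2⟩
          · exact absurd (h2 ▸ h1) hy)]
      rw [hdrop]
      simp [hnd]

-- ===== VERDICT (by name: the statement is the Claim_ definition above) =====
theorem bagdiff_on_merge_spec : Claim_equal_bagdiff_on_merge := by
  intro xs ys _
  unfold Spec_bagdiff_on_merge bagdiff_on_merge bagdiff_on_merge_alt
  rw [bagdiffLoop_eq xs ys (xs.length - 0) 0 rfl [] [] (by simp)]
  simp
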